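-- pv_equiv track=rewrite | github.com/GMuradas99/2048-project | functions.py | getPotentialGain
-- ===== SOURCE A (Python) =====
-- def getPotentialGain(row):
--     result = 0
--     pointer = row[0]
--     for i in range(1, len(row)):
--         if pointer == 0:
--             pointer = row[i]
--         elif pointer == row[i]:
--             result += pow(2,pointer)*2
--             pointer = 0
--         elif pointer != row[i] and row[i] != 0:
--             pointer = row[i]
--
--     return result
-- ===== SOURCE B (Python) =====
-- def getPotentialGain(row):
--     nz = [x for x in row if x != 0]
--     result = 0
--     i = 0
--     while i + 1 < len(nz):
--         if nz[i] == nz[i + 1]: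
--             result += 2 ** (nz[i] + 1)
--             i += 2
--         else:
--             i += 1
--     return result
-- ===== Notes on version B (the rewrite author's own statement) =====
-- stated objective: simpler
-- what changed: B first filters out the zero tiles, then pairs equal neighbours in one index walk over the non-zero sequence, replacing A's single stateful pointer scan that re-implements zero-skipping inside four branches.
-- outside the precondition, e.g. on getPotentialGain([-1, -1]): A returns 1.0, B returns 1; on getPotentialGain([]): A raises IndexError, B returns 0
import Mathlib
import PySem

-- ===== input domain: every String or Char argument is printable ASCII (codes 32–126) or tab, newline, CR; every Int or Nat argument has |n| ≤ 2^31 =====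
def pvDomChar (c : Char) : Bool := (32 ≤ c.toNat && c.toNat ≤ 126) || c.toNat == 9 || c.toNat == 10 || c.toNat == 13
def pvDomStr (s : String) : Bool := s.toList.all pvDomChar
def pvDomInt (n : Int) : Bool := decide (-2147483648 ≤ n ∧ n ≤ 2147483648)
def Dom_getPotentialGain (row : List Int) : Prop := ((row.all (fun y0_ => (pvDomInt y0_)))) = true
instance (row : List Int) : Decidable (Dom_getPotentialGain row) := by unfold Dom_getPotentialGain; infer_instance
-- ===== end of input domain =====

-- B filters the zeros out first and then pairs equal neighbours in one walk,
-- instead of A's stateful pointer scan (objective: simpler decomposition; same cost).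

-- ===== PORT A =====
-- the loop body of A, one step per row[i] (state = (result, pointer))
def pvStepA (st : Int × Int) (ri : Int) : Int × Int :=
  if st.2 = 0 then (st.1, ri)
  else if st.2 = ri then (st.1 + 2 ^ st.2.toNat * 2, 0)   -- pow(2, pointer)*2; pointer ≥ 0 under Pre_
  else if st.2 ≠ ri ∧ ri ≠ 0 then (st.1, ri)
  else st

def getPotentialGain (row : List Int) : Int :=
  match PySem.List.pyGet? row 0 with
  | none => 0   -- row[0] raises IndexError; excluded by Pre_
  | some p0 =>
    ((PySem.List.pyRange 1 (row.length : Int) 1).foldl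
      (fun st i => pvStepA st (PySem.List.pyGetD row i 0)) (0, p0)).1

-- ===== PORT B =====
-- B's index walk over nz: nz[i] vs nz[i+1], advance by 2 on a merge, by 1 otherwise
def pvPairGain : List Int → Int
  | a :: b :: rest => if a = b then 2 ^ (a + 1).toNat + pvPairGain rest else pvPairGain (b :: rest)
  | _ => 0

def getPotentialGain_alt (row : List Int) : Int :=
  pvPairGain (row.filter (fun x => x ≠ 0))

-- ===== PRECONDITION & SPEC =====
-- no two adjacent equal negative tiles in the list (chain condition on adjacent pairs)
def pvNoNegPair : List Int → Bool
  | a :: b :: rest => !(a == b && a < 0) && pvNoNegPair (b :: rest)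
  | _ => true

-- Pre_ excludes the empty row, where A raises IndexError (row[0]), and rows whose
-- non-zero sequence contains two equal adjacent negative tiles, on which A merges
-- them and returns a float (pow(2, negative)*2), not an int.
def Pre_getPotentialGain (row : List Int) : Prop :=
  row ≠ [] ∧ pvNoNegPair (row.filter (fun x => x ≠ 0)) = true
instance (row : List Int) : Decidable (Pre_getPotentialGain row) := by
  unfold Pre_getPotentialGain; infer_instance

def pvWitness_getPotentialGain : List Int := [2, 2, 0, -1, 3, 3]

def Spec_getPotentialGain (row : List Int) (out : Int) : Prop := out = getPotentialGain_alt row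
instance (row : List Int) (out : Int) : Decidable (Spec_getPotentialGain row out) := by
  unfold Spec_getPotentialGain; infer_instance

-- ===== CLAIM (what is proved, stated in full; the proofs are below) =====
def Claim_equal_getPotentialGain : Prop := ∀ (row : List Int), Dom_getPotentialGain row → Pre_getPotentialGain row → Spec_getPotentialGain row (getPotentialGain row)

-- ===== LEMMAS AND PROOFS =====

-- the pending pointer p, rendered as the prefix of the non-zero sequence it stands for
def pvPend (p : Int) : List Int := if p = 0 then [] else [p]

theorem pvNoNegPair_tail (a : Int) (l : List Int) (h : pvNoNegPair (a :: l) = true) :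
    pvNoNegPair l = true := by
  cases l with
  | nil => rfl
  | cons b rest => simp [pvNoNegPair] at h ⊢; exact h.2

-- loop invariant: A's fold from state (r, p) over xs adds exactly the pair gains
-- of (pending p ++ non-zeros of xs), provided that list has no equal adjacent
-- negative pair (so every merge fires on a non-negative tile)
theorem pvStepA_inv (xs : List Int) : ∀ (r p : Int),
    pvNoNegPair (pvPend p ++ xs.filter (fun x => x ≠ 0)) = true →
    (xs.foldl pvStepA (r, p)).1 = r + pvPairGain (pvPend p ++ xs.filter (fun x => x ≠ 0)) := by
  induction xs with
  | nil =>
    intro r p _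
    simp [pvPend]
    split_ifs with h <;> simp [pvPairGain]
  | cons x xs ih =>
    intro r p hnn
    by_cases hp0 : p = 0
    · subst hp0
      by_cases hx0 : x = 0
      · subst hx0
        simp only [List.foldl_cons, pvStepA]
        simpa [pvPend] using ih r 0 (by simpa [pvPend] using hnn)
      · have hnn' : pvNoNegPair (pvPend x ++ xs.filter (fun y => y ≠ 0)) = true := by
          simpa [pvPend, hx0, List.filter_cons] using hnn
        simp [List.foldl_cons, pvStepA, pvPend, hx0, ih r x hnn']
    · by_cases hpx : p = x
      · subst hpx
        have hpne : p ≠ 0 := hp0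
        have hsh : pvPend p ++ (p :: xs).filter (fun y => y ≠ 0)
            = p :: p :: xs.filter (fun y => y ≠ 0) := by
          simp [pvPend, hpne]
        rw [hsh] at hnn
        have hnng : ¬ (p = p ∧ p < 0) := by
          intro hc
          simp [pvNoNegPair] at hnn
          omega
        have hp : (0:Int) ≤ p := by omega
        have htl : pvNoNegPair (xs.filter (fun y => y ≠ 0)) = true :=
          pvNoNegPair_tail p _ (pvNoNegPair_tail p _ hnn)
        have h2 : (2:Int) ^ p.toNat * 2 = 2 ^ (p + 1).toNat := by
          have : (p + 1).toNat = p.toNat + 1 := by omega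
          rw [this, pow_succ]
        have hstep : pvStepA (r, p) p = (r + 2 ^ p.toNat * 2, 0) := by
          simp [pvStepA, hp0]
        simp only [List.foldl_cons, hstep]
        rw [ih (r + 2 ^ p.toNat * 2) 0 (by simpa [pvPend] using htl)]
        rw [hsh]
        simp [pvPend, pvPairGain, h2]
        ring
      · by_cases hx0 : x = 0
        · subst hx0
          have : pvStepA (r, p) 0 = (r, p) := by
            simp [pvStepA, hp0]
          simp only [List.foldl_cons, this]
          rw [ih r p (by simpa [List.filter_cons] using hnn)]
          simp
        · have hsh : pvPend p ++ (x :: xs).filter (fun y => y ≠ 0)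
              = p :: x :: xs.filter (fun y => y ≠ 0) := by
            simp [pvPend, hp0, hx0]
          rw [hsh] at hnn
          have hnn' : pvNoNegPair (pvPend x ++ xs.filter (fun y => y ≠ 0)) = true := by
            simpa [pvPend, hx0] using pvNoNegPair_tail p _ hnn
          have : pvStepA (r, p) x = (r, x) := by
            simp [pvStepA, hp0, hpx, hx0]
          simp only [List.foldl_cons, this]
          rw [ih r x hnn', hsh]
          simp [pvPend, hx0, pvPairGain, Ne.symm, hpx]

theorem getPotentialGain_spec : Claim_equal_getPotentialGain := by
  intro row _ hpre
  obtain ⟨hne, hnn⟩ := hpre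
  obtain ⟨h, t, rfl⟩ : ∃ h t, row = h :: t := by
    cases row with
    | nil => exact absurd rfl hne
    | cons h t => exact ⟨h, t, rfl⟩
  show getPotentialGain (h :: t) = getPotentialGain_alt (h :: t)
  have hnn' : pvNoNegPair (pvPend h ++ t.filter (fun x => x ≠ 0)) = true := by
    by_cases hh0 : h = 0 <;> simpa [pvPend, hh0, List.filter_cons] using hnn
  have hfold := PySem.List.foldl_pyRange_pyGetD' (h :: t) 0 pvStepA ((0:Int), h)
    (a := 1) (by norm_num)
  have hA : getPotentialGain (h :: t) = (t.foldl pvStepA (0, h)).1 := by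
    simp only [getPotentialGain, PySem.List.pyGet?, PySem.List.pyIdx?]
    norm_num
    rw [show ((t.length : Int) + 1) = ((h :: t).length : Int) by simp]
    rw [hfold]
    simp
  rw [hA, pvStepA_inv t 0 h hnn']
  simp only [getPotentialGain_alt, List.filter_cons]
  by_cases hh0 : h = 0
  · simp [pvPend, hh0]
  · simp [pvPend, hh0]
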